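-- pv_equiv track=rewrite | github.com/databricks-solutions/ai-dev-kit | databricks-skills/databricks-powerbi-migration/scripts/extract_dbx_schema.py | _parse_describe
-- ===== SOURCE A (Python) =====
-- def _parse_describe(data_array: list) -> tuple[list, dict]:
--     columns = []
--     properties = {}
--     in_columns = True
--
--     for row in data_array:
--         col_name = row[0] if row[0] else ""
--         col_type = row[1] if len(row) > 1 and row[1] else ""
--         comment = row[2] if len(row) > 2 and row[2] else ""
--
--         if col_name.strip() == "" or col_name.startswith("#"):
--             in_columns = False
--             continue
--
--         if in_columns and col_type:
--             columns.append({
--                 "name": col_name.strip(),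
--                 "type": col_type.strip(),
--                 "comment": comment.strip(),
--             })
--         elif not in_columns and col_name.strip() and col_type:
--             properties[col_name.strip()] = col_type.strip()
--
--     return columns, properties
-- ===== SOURCE B (Python) =====
-- def _parse_describe(data_array: list) -> tuple[list, dict]:
--     def is_sep(row):
--         return row[0].strip() == "" or row[0].startswith("#")
--
--     idx = next((i for i, r in enumerate(data_array) if is_sep(r)), len(data_array))
--     columns = [
--         {
--             "name": r[0].strip(),
--             "type": r[1].strip(),
--             "comment": (r[2] if len(r) > 2 and r[2] else "").strip(),
--         }
--         for r in data_array[:idx]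
--         if len(r) > 1 and r[1]
--     ]
--     properties = {
--         r[0].strip(): r[1].strip()
--         for r in data_array[idx:]
--         if not is_sep(r) and len(r) > 1 and r[1]
--     }
--     return columns, properties
-- ===== Notes on version B (the rewrite author's own statement) =====
-- stated objective: simpler
-- what changed: Replaces the single stateful pass with an in_columns flag by finding the first separator row, then building columns from the prefix with one filter+map and properties from the suffix with one filtered dict comprehension.
import Mathlib
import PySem

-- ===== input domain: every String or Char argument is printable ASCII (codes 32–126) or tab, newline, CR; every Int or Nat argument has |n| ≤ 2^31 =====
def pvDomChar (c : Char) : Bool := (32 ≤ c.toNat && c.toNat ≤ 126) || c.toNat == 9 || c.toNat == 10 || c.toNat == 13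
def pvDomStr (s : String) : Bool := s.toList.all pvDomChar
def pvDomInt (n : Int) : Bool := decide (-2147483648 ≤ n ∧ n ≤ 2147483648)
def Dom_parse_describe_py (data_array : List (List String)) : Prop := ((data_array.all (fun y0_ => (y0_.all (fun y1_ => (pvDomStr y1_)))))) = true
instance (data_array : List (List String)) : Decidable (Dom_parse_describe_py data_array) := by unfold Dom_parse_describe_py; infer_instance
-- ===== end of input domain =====

-- B replaces A's single stateful flag-driven pass by a partition at the first separator row followed by two independent passes (columns, then properties); same cost, plainer structure.
-- ===== PORT A =====
-- A's loop body as a named step function over the state (columns, properties, in_columns).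
def pvStepA (st : (List (List (String × String))) × PySem.Dict String String × Bool)
    (row : List String) : (List (List (String × String))) × PySem.Dict String String × Bool :=
  let col_name := (PySem.List.pyGet? row 0).getD ""   -- row[0]; Pre_ excludes empty rows (Python raises IndexError); 'x if x else ""' is x itself for strings
  let col_type := (PySem.List.pyGet? row 1).getD ""   -- row[1] if len(row) > 1 and row[1] else ""
  let comment  := (PySem.List.pyGet? row 2).getD ""   -- row[2] if len(row) > 2 and row[2] else ""
  if PySem.Str.strip col_name == "" || PySem.Str.startswith col_name "#" then
    (st.1, st.2.1, false)                              -- in_columns = False; continue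
  else if st.2.2 && !(col_type == "") then
    (st.1 ++ [[("name", PySem.Str.strip col_name), ("type", PySem.Str.strip col_type),
               ("comment", PySem.Str.strip comment)]], st.2.1, st.2.2)
  else if !st.2.2 && !(PySem.Str.strip col_name == "") && !(col_type == "") then
    (st.1, st.2.1.insert (PySem.Str.strip col_name) (PySem.Str.strip col_type), st.2.2)
  else st

def parse_describe_py (data_array : List (List String)) :
    (List (List (String × String))) × (List (String × String)) :=
  let st := data_array.foldl pvStepA ([], PySem.Dict.empty, true)
  (st.1, st.2.1.items)

-- ===== PORT B =====
def pvRowSep (row : List String) : Bool :=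
  PySem.Str.strip ((PySem.List.pyGet? row 0).getD "") == ""
    || PySem.Str.startswith ((PySem.List.pyGet? row 0).getD "") "#"

def pvRowType (row : List String) : String := (PySem.List.pyGet? row 1).getD ""

def pvMkCol (row : List String) : List (String × String) :=
  [("name", PySem.Str.strip ((PySem.List.pyGet? row 0).getD "")),
   ("type", PySem.Str.strip (pvRowType row)),
   ("comment", PySem.Str.strip ((PySem.List.pyGet? row 2).getD ""))]

def parse_describe_py_alt (data_array : List (List String)) :
    (List (List (String × String))) × (List (String × String)) :=
  let colseg := data_array.takeWhile (fun r => !pvRowSep r)     -- data_array[:idx], idx = first separator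
  let propseg := data_array.dropWhile (fun r => !pvRowSep r)    -- data_array[idx:]
  let columns := (colseg.filter (fun r => !(pvRowType r == ""))).map pvMkCol
  let properties := (propseg.filter (fun r => !pvRowSep r && !(pvRowType r == ""))).foldl
    (fun d r => d.insert (PySem.Str.strip ((PySem.List.pyGet? r 0).getD "")) (PySem.Str.strip (pvRowType r)))
    PySem.Dict.empty
  (columns, properties.items)

-- ===== PRECONDITION & SPEC =====
-- Pre_ excludes inputs containing an empty row, on which Python A raises IndexError at row[0] (B raises there too).
def Pre_parse_describe_py (data_array : List (List String)) : Prop :=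
  ∀ row ∈ data_array, row ≠ []
instance (data_array : List (List String)) : Decidable (Pre_parse_describe_py data_array) := by
  unfold Pre_parse_describe_py; infer_instance

def pvWitness_parse_describe_py : List (List String) :=
  [["id", "int", "pk"], ["name", "string"], ["# Metadata", ""], ["Owner", "alice"]]

def Spec_parse_describe_py (data_array : List (List String)) (out : (List (List (String × String))) × (List (String × String))) : Prop := out = parse_describe_py_alt data_array
instance (data_array : List (List String)) (out : (List (List (String × String))) × (List (String × String))) : Decidable (Spec_parse_describe_py data_array out) := by unfold Spec_parse_describe_py; infer_instance

-- ===== CLAIM (what is proved, stated in full; the proofs are below) =====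
def Claim_equal_parse_describe_py : Prop := ∀ (data_array : List (List String)), Dom_parse_describe_py data_array → Pre_parse_describe_py data_array → Spec_parse_describe_py data_array (parse_describe_py data_array)

-- ===== LEMMAS AND PROOFS =====
-- The property-phase fold B performs, as a named function for the lemmas.
def pvPropFold (l : List (List String)) (d : PySem.Dict String String) : PySem.Dict String String :=
  (l.filter (fun r => !pvRowSep r && !(pvRowType r == ""))).foldl
    (fun d r => d.insert (PySem.Str.strip ((PySem.List.pyGet? r 0).getD "")) (PySem.Str.strip (pvRowType r))) d

-- A's loop with in_columns already False collects exactly B's property entries.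
theorem foldA_false (l : List (List String)) (cols : List (List (String × String)))
    (d : PySem.Dict String String) :
    l.foldl pvStepA (cols, d, false) = (cols, pvPropFold l d, false) := by
  induction l generalizing d with
  | nil => simp [pvPropFold]
  | cons r t ih =>
    by_cases hsep : pvRowSep r = true
    · have : pvStepA (cols, d, false) r = (cols, d, false) := by
        simp only [pvStepA, pvRowSep] at hsep ⊢; rw [if_pos hsep]
      simp only [List.foldl_cons, this, pvPropFold, List.filter_cons, hsep]
      simpa [pvPropFold] using ih d
    · by_cases hty : pvRowType r = ""
      · have : pvStepA (cols, d, false) r = (cols, d, false) := by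
          simp only [pvStepA, pvRowSep] at hsep ⊢
          rw [if_neg (by simpa using hsep)]
          simp [pvRowType] at hty
          simp [hty]
        simp only [List.foldl_cons, this, pvPropFold, List.filter_cons]
        have : (!pvRowSep r && !(pvRowType r == "")) = false := by simp [hty]
        rw [this]
        simpa [pvPropFold] using ih d
      · have hsep' : pvRowSep r = false := by simpa using hsep
        simp only [pvRowSep, Bool.or_eq_false_iff] at hsep'
        have hname : (PySem.Str.strip ((PySem.List.pyGet? r 0).getD "") == "") = false := hsep'.1
        have : pvStepA (cols, d, false) r
            = (cols, d.insert (PySem.Str.strip ((PySem.List.pyGet? r 0).getD ""))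
                (PySem.Str.strip (pvRowType r)), false) := by
          simp only [pvStepA, pvRowType] at hty ⊢
          rw [if_neg (by simp [hname]; simpa using hsep'.2)]
          simp [hname, hty]
        simp only [List.foldl_cons, this, pvPropFold, List.filter_cons]
        have hc : (!pvRowSep r && !(pvRowType r == "")) = true := by
          simp [hsep, hty]
        rw [hc]
        simpa [pvPropFold] using ih _
-- A's loop from in_columns = True: columns come from the prefix before the first separator,
-- properties from the rest, the flag records whether a separator was seen.
theorem foldA_true (l : List (List String)) (cols : List (List (String × String)))
    (d : PySem.Dict String String) :
    l.foldl pvStepA (cols, d, true)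
      = (cols ++ ((l.takeWhile (fun r => !pvRowSep r)).filter (fun r => !(pvRowType r == ""))).map pvMkCol,
         pvPropFold (l.dropWhile (fun r => !pvRowSep r)) d,
         l.all (fun r => !pvRowSep r)) := by
  induction l generalizing cols with
  | nil => simp [pvPropFold]
  | cons r t ih =>
    by_cases hsep : pvRowSep r = true
    · have hstep : pvStepA (cols, d, true) r = (cols, d, false) := by
        simp only [pvStepA, pvRowSep] at hsep ⊢; rw [if_pos hsep]
      simp only [List.foldl_cons, hstep, foldA_false, List.takeWhile_cons, List.dropWhile_cons,
        List.all_cons, hsep]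
      simp [pvPropFold, hsep]
    · by_cases hty : pvRowType r = ""
      · have hstep : pvStepA (cols, d, true) r = (cols, d, true) := by
          simp only [pvStepA, pvRowSep, pvRowType] at hsep hty ⊢
          rw [if_neg (by simpa using hsep)]
          simp [hty]
        simp only [List.foldl_cons, hstep, ih, List.takeWhile_cons, List.dropWhile_cons,
          List.all_cons]
        simp [hsep, hty]
      · have hstep : pvStepA (cols, d, true) r = (cols ++ [pvMkCol r], d, true) := by
          simp only [pvStepA, pvRowSep, pvRowType, pvMkCol] at hsep hty ⊢
          rw [if_neg (by simpa using hsep)]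
          simp [hty]
        simp only [List.foldl_cons, hstep, ih, List.takeWhile_cons, List.dropWhile_cons,
          List.all_cons]
        simp [hsep, hty]

-- ===== VERDICT (by name: the statement is the Claim_ definition above) =====
theorem parse_describe_py_spec : Claim_equal_parse_describe_py := by
  intro data_array _ _
  unfold Spec_parse_describe_py parse_describe_py parse_describe_py_alt
  rw [foldA_true]
  simp [pvPropFold]
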